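-- pv_equiv track=rewrite | github.com/BriarDevv/Scouter | scripts/browserctl.py | extract_social_links
-- ===== SOURCE A (Python) =====
-- SOCIAL_PATTERNS = {
--     "instagram": ("instagram.com",),
--     "facebook": ("facebook.com", "fb.com", "m.facebook.com"),
--     "linkedin": ("linkedin.com",),
-- }
--
-- def dedupe_strings(values: list[str]) -> list[str]:
--     seen: set[str] = set()
--     result: list[str] = []
--     for value in values:
--         normalized = value.strip()
--         if not normalized:
--             continue
--         key = normalized.casefold()
--         if key in seen:
--             continue
--         seen.add(key)
--         result.append(normalized)
--     return result
--
-- def extract_social_links(anchors: list[dict[str, str]]) -> dict[str, list[str]]: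
--     social_links: dict[str, list[str]] = {network: [] for network in SOCIAL_PATTERNS}
--     for anchor in anchors:
--         href = anchor["href"].lower()
--         for network, patterns in SOCIAL_PATTERNS.items():
--             if any(pattern in href for pattern in patterns):
--                 social_links[network].append(anchor["href"])
--     return {network: dedupe_strings(urls)[:5] for network, urls in social_links.items()}
-- ===== SOURCE B (Python) =====
-- SOCIAL_PATTERNS = {
--     "instagram": ("instagram.com",),
--     "facebook": ("facebook.com", "fb.com", "m.facebook.com"),
--     "linkedin": ("linkedin.com",),
-- }
--
-- def extract_social_links(anchors: list[dict[str, str]]) -> dict[str, list[str]]: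
--     # One streaming pass: classify, dedupe (casefolded key) and cap at 5 per network.
--     results: dict[str, list[str]] = {network: [] for network in SOCIAL_PATTERNS}
--     seen: dict[str, set[str]] = {network: set() for network in SOCIAL_PATTERNS}
--     for anchor in anchors:
--         href = anchor["href"]
--         href_lower = href.lower()
--         for network, patterns in SOCIAL_PATTERNS.items():
--             if not any(pattern in href_lower for pattern in patterns):
--                 continue
--             normalized = href.strip()
--             if not normalized:
--                 continue
--             key = normalized.casefold()
--             bucket = results[network]
--             if key not in seen[network] and len(bucket) < 5:
--                 seen[network].add(key)
--                 bucket.append(normalized)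
--     return results
-- ===== Notes on version B (the rewrite author's own statement) =====
-- stated objective: simpler
-- what changed: B replaces A's three phases (collect matching hrefs per network, then dedupe_strings, then a final dict comprehension slicing [:5]) by one streaming pass that classifies, dedupes via a per-network casefolded seen-set and stops adding at 5, with no helper function and no second pass.
import Mathlib
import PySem

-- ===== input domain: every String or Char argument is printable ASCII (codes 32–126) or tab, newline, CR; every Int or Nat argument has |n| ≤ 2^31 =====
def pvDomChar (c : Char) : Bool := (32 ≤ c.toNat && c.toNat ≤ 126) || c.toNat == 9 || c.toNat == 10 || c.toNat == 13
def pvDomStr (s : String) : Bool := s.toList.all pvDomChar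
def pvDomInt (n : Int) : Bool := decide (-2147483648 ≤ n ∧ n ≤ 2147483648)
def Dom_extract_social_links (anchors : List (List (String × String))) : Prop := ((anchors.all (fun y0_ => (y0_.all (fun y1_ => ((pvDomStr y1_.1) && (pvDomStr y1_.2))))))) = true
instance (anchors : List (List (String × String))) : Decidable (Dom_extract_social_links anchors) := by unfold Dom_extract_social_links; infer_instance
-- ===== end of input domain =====

-- B fuses A's collect / dedupe_strings / [:5] passes into one streaming pass with a per-network
-- seen-set and 5-cap (objective: simpler — no helper, no second pass, no final comprehension).
-- str.casefold is ported as PySem.Str.lower: identical on the ASCII domain Dom_ restricts to.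

-- ===== PORT A =====
def SOCIAL_PATTERNS : List (String × List String) :=
  [("instagram", ["instagram.com"]),
   ("facebook", ["facebook.com", "fb.com", "m.facebook.com"]),
   ("linkedin", ["linkedin.com"])]

-- loop body of dedupe_strings, named so the proofs can speak about it
def dstep (st : PySem.Set String × List String) (value : String) : PySem.Set String × List String :=
  let normalized := PySem.Str.strip value
  if normalized = "" then st
  else
    let key := PySem.Str.lower normalized   -- casefold; exact on ASCII
    if PySem.Set.contains st.1 key then st
    else (PySem.Set.add st.1 key, st.2 ++ [normalized])

def dedupe_strings (values : List String) : List String :=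
  (values.foldl dstep (PySem.Set.empty, [])).2

-- one iteration of A's outer loop (anchor["href"]: Pre_ guarantees the key is present)
def astep (d : PySem.Dict String (List String)) (anchor : List (String × String)) :
    PySem.Dict String (List String) :=
  let href := PySem.Str.lower ((PySem.Dict.mk anchor).getD "href" "")
  SOCIAL_PATTERNS.foldl (fun d np =>
    if np.2.any (fun pattern => PySem.Str.isIn pattern href) then
      PySem.Dict.modify d np.1 [] (fun l => l ++ [(PySem.Dict.mk anchor).getD "href" ""])
    else d) d

def extract_social_links (anchors : List (List (String × String))) : List (String × List String) :=
  let social_links : PySem.Dict String (List String) :=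
    PySem.Dict.mk (SOCIAL_PATTERNS.map (fun p => (p.1, ([] : List String))))
  let social_links := anchors.foldl astep social_links
  (social_links.items.map (fun p => (p.1, PySem.List.slice (dedupe_strings p.2) none (some 5))))

-- ===== PORT B =====
-- body of B's inner loop over SOCIAL_PATTERNS.items(), named as a helper
def bupdate (href href_lower : String)
    (st : PySem.Dict String (List String) × PySem.Dict String (PySem.Set String))
    (np : String × List String) :
    PySem.Dict String (List String) × PySem.Dict String (PySem.Set String) :=
  if np.2.any (fun pattern => PySem.Str.isIn pattern href_lower) then
    let normalized := PySem.Str.strip href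
    if normalized = "" then st
    else
      let key := PySem.Str.lower normalized   -- casefold; exact on ASCII
      let bucket := st.1.getD np.1 []
      if !(PySem.Set.contains (st.2.getD np.1 PySem.Set.empty) key) && bucket.length < 5 then
        (st.1.insert np.1 (bucket ++ [normalized]),
         st.2.insert np.1 (PySem.Set.add (st.2.getD np.1 PySem.Set.empty) key))
      else st
  else st

-- one iteration of B's outer loop: the two dicts (results, seen) updated in one pass
def bstep (st : PySem.Dict String (List String) × PySem.Dict String (PySem.Set String))
    (anchor : List (String × String)) :
    PySem.Dict String (List String) × PySem.Dict String (PySem.Set String) :=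
  let href := (PySem.Dict.mk anchor).getD "href" ""
  let href_lower := PySem.Str.lower href
  SOCIAL_PATTERNS.foldl (bupdate href href_lower) st

def extract_social_links_alt (anchors : List (List (String × String))) :
    List (String × List String) :=
  let results : PySem.Dict String (List String) :=
    PySem.Dict.mk (SOCIAL_PATTERNS.map (fun p => (p.1, ([] : List String))))
  let seen : PySem.Dict String (PySem.Set String) :=
    PySem.Dict.mk (SOCIAL_PATTERNS.map (fun p => (p.1, PySem.Set.empty)))
  (anchors.foldl bstep (results, seen)).1.items

-- ===== PRECONDITION & SPEC =====
-- Pre_ excludes anchors without an "href" key, on which A raises KeyError.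
def Pre_extract_social_links (anchors : List (List (String × String))) : Prop :=
  ∀ a ∈ anchors, (PySem.Dict.mk a).contains "href" = true
instance (anchors : List (List (String × String))) : Decidable (Pre_extract_social_links anchors) := by
  unfold Pre_extract_social_links; infer_instance

def pvWitness_extract_social_links : (List (List (String × String))) :=
  [[("href", "https://instagram.com/a")], [("href", " https://fb.com/b ")]]

def Spec_extract_social_links (anchors : List (List (String × String))) (out : List (String × List String)) : Prop := out = extract_social_links_alt anchors
instance (anchors : List (List (String × String))) (out : List (String × List String)) : Decidable (Spec_extract_social_links anchors out) := by unfold Spec_extract_social_links; infer_instance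

-- ===== CLAIM (what is proved, stated in full; the proofs are below) =====
def Claim_equal_extract_social_links : Prop := ∀ (anchors : List (List (String × String))), Dom_extract_social_links anchors → Pre_extract_social_links anchors → Spec_extract_social_links anchors (extract_social_links anchors)

-- ===== LEMMAS AND PROOFS =====

-- proof-side abbreviations
def hrefOf (a : List (String × String)) : String := (PySem.Dict.mk a).getD "href" ""

def matchp (pats : List String) (a : List (String × String)) : Bool :=
  pats.any (fun pattern => PySem.Str.isIn pattern (PySem.Str.lower (hrefOf a)))

def collect (pats : List String) (anchors : List (List (String × String))) : List String :=
  (anchors.filter (matchp pats)).map hrefOf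

-- B's per-network streaming step on a raw href
def sstep (st : List String × PySem.Set String) (href : String) : List String × PySem.Set String :=
  let normalized := PySem.Str.strip href
  if normalized = "" then st
  else
    let key := PySem.Str.lower normalized
    if !(PySem.Set.contains st.2 key) && st.1.length < 5 then
      (st.1 ++ [normalized], PySem.Set.add st.2 key)
    else st

theorem astep_shape (l1 l2 l3 : List String) (a : List (String × String)) :
    astep (PySem.Dict.mk [("instagram", l1), ("facebook", l2), ("linkedin", l3)]) a =
      PySem.Dict.mk
        [("instagram", if matchp ["instagram.com"] a then l1 ++ [hrefOf a] else l1),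
         ("facebook", if matchp ["facebook.com", "fb.com", "m.facebook.com"] a then l2 ++ [hrefOf a] else l2),
         ("linkedin", if matchp ["linkedin.com"] a then l3 ++ [hrefOf a] else l3)] := by
  unfold astep matchp hrefOf SOCIAL_PATTERNS
  simp only [List.foldl]
  split_ifs <;> rfl

theorem collect_cons (pats : List String) (a : List (String × String))
    (t : List (List (String × String))) :
    collect pats (a :: t) = (if matchp pats a then [hrefOf a] else []) ++ collect pats t := by
  simp only [collect, List.filter_cons]
  cases matchp pats a <;> simp

theorem afold_shape (anchors : List (List (String × String))) :
    ∀ (l1 l2 l3 : List String),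
    anchors.foldl astep (PySem.Dict.mk [("instagram", l1), ("facebook", l2), ("linkedin", l3)]) =
      PySem.Dict.mk
        [("instagram", l1 ++ collect ["instagram.com"] anchors),
         ("facebook", l2 ++ collect ["facebook.com", "fb.com", "m.facebook.com"] anchors),
         ("linkedin", l3 ++ collect ["linkedin.com"] anchors)] := by
  induction anchors with
  | nil => intro l1 l2 l3; simp [collect]
  | cons a t ih =>
    intro l1 l2 l3
    rw [List.foldl_cons, astep_shape, ih, collect_cons, collect_cons, collect_cons]
    cases matchp ["instagram.com"] a <;>
      cases matchp ["facebook.com", "fb.com", "m.facebook.com"] a <;>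
      cases matchp ["linkedin.com"] a <;> simp


-- reduction of dict primitives on the fixed three-key dicts of both ports (each is rfl)
@[simp] theorem pv_getD_I {ν : Type} (x y z d0 : ν) :
    (PySem.Dict.mk [("instagram", x), ("facebook", y), ("linkedin", z)]).getD "instagram" d0 = x := rfl
@[simp] theorem pv_getD_F {ν : Type} (x y z d0 : ν) :
    (PySem.Dict.mk [("instagram", x), ("facebook", y), ("linkedin", z)]).getD "facebook" d0 = y := rfl
@[simp] theorem pv_getD_L {ν : Type} (x y z d0 : ν) :
    (PySem.Dict.mk [("instagram", x), ("facebook", y), ("linkedin", z)]).getD "linkedin" d0 = z := rfl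
@[simp] theorem pv_insert_I {ν : Type} (x y z v : ν) :
    (PySem.Dict.mk [("instagram", x), ("facebook", y), ("linkedin", z)]).insert "instagram" v
      = PySem.Dict.mk [("instagram", v), ("facebook", y), ("linkedin", z)] := rfl
@[simp] theorem pv_insert_F {ν : Type} (x y z v : ν) :
    (PySem.Dict.mk [("instagram", x), ("facebook", y), ("linkedin", z)]).insert "facebook" v
      = PySem.Dict.mk [("instagram", x), ("facebook", v), ("linkedin", z)] := rfl
@[simp] theorem pv_insert_L {ν : Type} (x y z v : ν) :
    (PySem.Dict.mk [("instagram", x), ("facebook", y), ("linkedin", z)]).insert "linkedin" v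
      = PySem.Dict.mk [("instagram", x), ("facebook", y), ("linkedin", v)] := rfl

theorem bupdate_I (h hl : String) (l1 l2 l3 : List String) (s1 s2 s3 : PySem.Set String) :
    bupdate h hl (PySem.Dict.mk [("instagram", l1), ("facebook", l2), ("linkedin", l3)],
                  PySem.Dict.mk [("instagram", s1), ("facebook", s2), ("linkedin", s3)])
        ("instagram", ["instagram.com"]) =
      (PySem.Dict.mk [("instagram", (if (["instagram.com"].any fun pattern => PySem.Str.isIn pattern hl) = true then sstep (l1, s1) h else (l1, s1)).1), ("facebook", l2), ("linkedin", l3)],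
       PySem.Dict.mk [("instagram", (if (["instagram.com"].any fun pattern => PySem.Str.isIn pattern hl) = true then sstep (l1, s1) h else (l1, s1)).2), ("facebook", s2), ("linkedin", s3)]) := by
  unfold bupdate sstep
  dsimp only
  simp only [pv_getD_I, pv_getD_F, pv_getD_L, pv_insert_I, pv_insert_F, pv_insert_L,
    Bool.and_eq_true, Bool.not_eq_true', decide_eq_true_eq]
  split_ifs <;> rfl

theorem bupdate_F (h hl : String) (l1 l2 l3 : List String) (s1 s2 s3 : PySem.Set String) :
    bupdate h hl (PySem.Dict.mk [("instagram", l1), ("facebook", l2), ("linkedin", l3)],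
                  PySem.Dict.mk [("instagram", s1), ("facebook", s2), ("linkedin", s3)])
        ("facebook", ["facebook.com", "fb.com", "m.facebook.com"]) =
      (PySem.Dict.mk [("instagram", l1), ("facebook", (if (["facebook.com", "fb.com", "m.facebook.com"].any fun pattern => PySem.Str.isIn pattern hl) = true then sstep (l2, s2) h else (l2, s2)).1), ("linkedin", l3)],
       PySem.Dict.mk [("instagram", s1), ("facebook", (if (["facebook.com", "fb.com", "m.facebook.com"].any fun pattern => PySem.Str.isIn pattern hl) = true then sstep (l2, s2) h else (l2, s2)).2), ("linkedin", s3)]) := by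
  unfold bupdate sstep
  dsimp only
  simp only [pv_getD_I, pv_getD_F, pv_getD_L, pv_insert_I, pv_insert_F, pv_insert_L,
    Bool.and_eq_true, Bool.not_eq_true', decide_eq_true_eq]
  split_ifs <;> rfl

theorem bupdate_L (h hl : String) (l1 l2 l3 : List String) (s1 s2 s3 : PySem.Set String) :
    bupdate h hl (PySem.Dict.mk [("instagram", l1), ("facebook", l2), ("linkedin", l3)],
                  PySem.Dict.mk [("instagram", s1), ("facebook", s2), ("linkedin", s3)])
        ("linkedin", ["linkedin.com"]) =
      (PySem.Dict.mk [("instagram", l1), ("facebook", l2), ("linkedin", (if (["linkedin.com"].any fun pattern => PySem.Str.isIn pattern hl) = true then sstep (l3, s3) h else (l3, s3)).1)],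
       PySem.Dict.mk [("instagram", s1), ("facebook", s2), ("linkedin", (if (["linkedin.com"].any fun pattern => PySem.Str.isIn pattern hl) = true then sstep (l3, s3) h else (l3, s3)).2)]) := by
  unfold bupdate sstep
  dsimp only
  simp only [pv_getD_I, pv_getD_F, pv_getD_L, pv_insert_I, pv_insert_F, pv_insert_L,
    Bool.and_eq_true, Bool.not_eq_true', decide_eq_true_eq]
  split_ifs <;> rfl

theorem bstep_shape (l1 l2 l3 : List String) (s1 s2 s3 : PySem.Set String)
    (a : List (String × String)) :
    bstep (PySem.Dict.mk [("instagram", l1), ("facebook", l2), ("linkedin", l3)],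
           PySem.Dict.mk [("instagram", s1), ("facebook", s2), ("linkedin", s3)]) a =
      (PySem.Dict.mk
        [("instagram", (if matchp ["instagram.com"] a then sstep (l1, s1) (hrefOf a) else (l1, s1)).1),
         ("facebook", (if matchp ["facebook.com", "fb.com", "m.facebook.com"] a then sstep (l2, s2) (hrefOf a) else (l2, s2)).1),
         ("linkedin", (if matchp ["linkedin.com"] a then sstep (l3, s3) (hrefOf a) else (l3, s3)).1)],
       PySem.Dict.mk
        [("instagram", (if matchp ["instagram.com"] a then sstep (l1, s1) (hrefOf a) else (l1, s1)).2),
         ("facebook", (if matchp ["facebook.com", "fb.com", "m.facebook.com"] a then sstep (l2, s2) (hrefOf a) else (l2, s2)).2),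
         ("linkedin", (if matchp ["linkedin.com"] a then sstep (l3, s3) (hrefOf a) else (l3, s3)).2)]) := by
  unfold bstep SOCIAL_PATTERNS
  dsimp only [List.foldl]
  rw [bupdate_I, bupdate_F, bupdate_L]
  simp only [matchp, hrefOf]

theorem bfold_shape (anchors : List (List (String × String))) :
    ∀ (l1 l2 l3 : List String) (s1 s2 s3 : PySem.Set String),
    anchors.foldl bstep
      (PySem.Dict.mk [("instagram", l1), ("facebook", l2), ("linkedin", l3)],
       PySem.Dict.mk [("instagram", s1), ("facebook", s2), ("linkedin", s3)]) =
      (PySem.Dict.mk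
        [("instagram", ((collect ["instagram.com"] anchors).foldl sstep (l1, s1)).1),
         ("facebook", ((collect ["facebook.com", "fb.com", "m.facebook.com"] anchors).foldl sstep (l2, s2)).1),
         ("linkedin", ((collect ["linkedin.com"] anchors).foldl sstep (l3, s3)).1)],
       PySem.Dict.mk
        [("instagram", ((collect ["instagram.com"] anchors).foldl sstep (l1, s1)).2),
         ("facebook", ((collect ["facebook.com", "fb.com", "m.facebook.com"] anchors).foldl sstep (l2, s2)).2),
         ("linkedin", ((collect ["linkedin.com"] anchors).foldl sstep (l3, s3)).2)]) := by
  induction anchors with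
  | nil => intro l1 l2 l3 s1 s2 s3; simp [collect]
  | cons a t ih =>
    intro l1 l2 l3 s1 s2 s3
    rw [List.foldl_cons, bstep_shape, ih, collect_cons, collect_cons, collect_cons]
    cases matchp ["instagram.com"] a <;>
      cases matchp ["facebook.com", "fb.com", "m.facebook.com"] a <;>
      cases matchp ["linkedin.com"] a <;> simp

-- the heart: the streaming pass computes take 5 of the dedupe pass
theorem stream_eq_dedupe_take (urls : List String) :
    ∀ (res res' : List String) (seen seen' : PySem.Set String),
    res = res'.take 5 →
    (∀ k, PySem.Set.contains seen k = true → PySem.Set.contains seen' k = true) →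
    (res'.length < 5 → seen = seen') →
    (urls.foldl sstep (res, seen)).1 = ((urls.foldl dstep (seen', res')).2).take 5 := by
  induction urls with
  | nil => intro res res' seen seen' h1 h2 h3; simpa using h1
  | cons u t ih =>
    intro res res' seen seen' h1 h2 h3
    rw [List.foldl_cons, List.foldl_cons]
    by_cases hn : PySem.Str.strip u = ""
    · rw [show sstep (res, seen) u = (res, seen) by simp [sstep, hn],
          show dstep (seen', res') u = (seen', res') by simp [dstep, hn]]
      exact ih _ _ _ _ h1 h2 h3
    · by_cases hsk : PySem.Set.contains seen' (PySem.Str.lower (PySem.Str.strip u)) = true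
      · have hsk' : PySem.Str.lower (PySem.Str.strip u) ∈ seen' := by simpa using hsk
        have hd : dstep (seen', res') u = (seen', res') := by simp [dstep, hn, hsk']
        cases hks : PySem.Set.contains seen (PySem.Str.lower (PySem.Str.strip u))
        · by_cases hlen : res'.length < 5
          · rw [h3 hlen] at hks; rw [hks] at hsk; cases hsk
          · have hres : res.length = 5 := by
              subst h1; simp [List.length_take]; omega
            have hb : sstep (res, seen) u = (res, seen) := by simp [sstep, hn, hres]
            rw [hb, hd]; exact ih _ _ _ _ h1 h2 h3
        · have hks' : PySem.Str.lower (PySem.Str.strip u) ∈ seen := by simpa using hks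
          have hb : sstep (res, seen) u = (res, seen) := by simp [sstep, hn, hks']
          rw [hb, hd]; exact ih _ _ _ _ h1 h2 h3
      · have hks : PySem.Set.contains seen (PySem.Str.lower (PySem.Str.strip u)) = false := by
          cases hq : PySem.Set.contains seen (PySem.Str.lower (PySem.Str.strip u))
          · rfl
          · exact absurd (h2 _ hq) hsk
        have hsk' : PySem.Str.lower (PySem.Str.strip u) ∉ seen' := by simpa using hsk
        have hks' : PySem.Str.lower (PySem.Str.strip u) ∉ seen := by simpa using hks
        have hd : dstep (seen', res') u =
            (PySem.Set.add seen' (PySem.Str.lower (PySem.Str.strip u)), res' ++ [PySem.Str.strip u]) := by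
          simp [dstep, hn, hsk']
        by_cases hlen : res'.length < 5
        · have hseen : seen = seen' := h3 hlen
          have hres : res = res' := by rw [h1, List.take_of_length_le (by omega)]
          have hrl : res.length < 5 := by rw [hres]; exact hlen
          have hb : sstep (res, seen) u =
              (res ++ [PySem.Str.strip u], PySem.Set.add seen (PySem.Str.lower (PySem.Str.strip u))) := by
            simp [sstep, hn, hks', hrl]
          rw [hb, hd]
          apply ih
          · rw [hres, List.take_of_length_le (by simp; omega)]
          · intro x hx; rw [hseen] at hx; exact hx
          · intro _; rw [hseen]
        · have hres : res.length = 5 := by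
            subst h1; simp [List.length_take]; omega
          have hb : sstep (res, seen) u = (res, seen) := by simp [sstep, hn, hres]
          rw [hb, hd]
          apply ih
          · rw [h1, List.take_append_of_le_length (by omega)]
          · intro x hx
            have := h2 x hx
            simp only [PySem.Set.add, hsk]
            simp [PySem.Set.contains, List.contains_append] at this ⊢
            exact Or.inl this
          · intro hl; exfalso; simp at hl; omega

-- ===== VERDICT (by name: the statement is the Claim_ definition above) =====
theorem extract_social_links_spec : Claim_equal_extract_social_links := by
  intro anchors _ _
  unfold Spec_extract_social_links extract_social_links extract_social_links_alt
  dsimp only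
  have e1 : PySem.Dict.mk (SOCIAL_PATTERNS.map (fun p => (p.1, ([] : List String)))) =
      PySem.Dict.mk [("instagram", []), ("facebook", []), ("linkedin", [])] := rfl
  have e2 : PySem.Dict.mk (SOCIAL_PATTERNS.map (fun p => (p.1, (PySem.Set.empty : PySem.Set String)))) =
      PySem.Dict.mk [("instagram", PySem.Set.empty), ("facebook", PySem.Set.empty),
                     ("linkedin", PySem.Set.empty)] := rfl
  rw [e1, e2, afold_shape, bfold_shape]
  have key : ∀ urls : List String,
      PySem.List.slice (dedupe_strings urls) none (some 5) = (urls.foldl sstep ([], PySem.Set.empty)).1 := by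
    intro urls
    rw [PySem.List.slice_to _ (by norm_num)]
    rw [stream_eq_dedupe_take urls [] [] PySem.Set.empty PySem.Set.empty rfl (fun _ h => h) (fun _ => rfl)]
    rfl
  simp only [List.nil_append, PySem.Dict.items]
  dsimp only [List.map]
  rw [key, key, key]
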